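-- pv_equiv track=rewrite | github.com/Lelouch0203/DSA | Notes/Recursion/poset.py | poset
-- ===== SOURCE A (Python) =====
-- def poset(s,index,current,result):
--     if index == len(s):
--         if current:
--             result.append(current)
--         return result
--     poset(s,index+1,current,result)
--     poset(s,index+1,current+s[index],result)
--     return result
-- ===== SOURCE B (Python) =====
-- def poset(s, index, current, result):
--     n = len(s) - index
--     for mask in range(1 << n):
--         cur = current
--         for j in range(n):
--             if (mask >> (n - 1 - j)) & 1:
--                 cur += s[index + j]
--         if cur:
--             result.append(cur)
--     return result
-- ===== Notes on version B (the rewrite author's own statement) =====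
-- stated objective: alternative
-- what changed: Replaces the recursive exclude/include binary-tree descent with a flat iterative bit-mask enumeration (mask over range(2^n), most-significant bit = s[index]) that reproduces the same ordered list of subset strings.
import Mathlib
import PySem

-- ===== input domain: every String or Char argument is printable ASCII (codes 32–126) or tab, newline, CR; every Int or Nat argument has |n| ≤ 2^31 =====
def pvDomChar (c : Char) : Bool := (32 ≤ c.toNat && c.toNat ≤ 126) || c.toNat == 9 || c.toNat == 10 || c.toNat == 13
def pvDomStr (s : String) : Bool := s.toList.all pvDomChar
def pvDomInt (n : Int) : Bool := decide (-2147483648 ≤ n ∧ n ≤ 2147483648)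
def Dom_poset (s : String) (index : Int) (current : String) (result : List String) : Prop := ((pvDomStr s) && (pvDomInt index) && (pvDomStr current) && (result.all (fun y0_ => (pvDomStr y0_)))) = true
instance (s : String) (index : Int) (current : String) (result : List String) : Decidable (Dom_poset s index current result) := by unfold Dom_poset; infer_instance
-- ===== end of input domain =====

-- B replaces A's recursive exclude/include descent by a flat bit-mask enumeration (MSB = s[index]);
-- equivalence is about the RETURN value (A mutates `result` in place; B appends the same items in the same order).


-- ===== PORT A =====
-- Literal transliteration of A's recursion. Outside Pre_ (index > len(s): Python recurses forever;
-- index < -len(s): s[index] raises IndexError) the guard / `none` branches return a dummy value.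
def poset (s : String) (index : Int) (current : String) (result : List String) : List String :=
  if index = PySem.Str.len s then
    if current = "" then result else result ++ [current]
  else if _h : index < PySem.Str.len s then
    let r1 := poset s (index + 1) current result
    match PySem.Str.pyGet? s index with
    | some c => poset s (index + 1) (current.push c) r1
    | none => r1
  else result
termination_by (PySem.Str.len s - index).toNat
decreasing_by all_goals (have hlen : PySem.Str.len s = (s.toList.length : Int) := rfl; omega)

-- ===== PORT B =====
-- cur for one mask: append s[index+j] when bit (n-1-j) of mask is set (Source B's inner loop)
def posetMask (s : String) (index : Int) (n : Nat) (current : String) (mask : Nat) : String :=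
  (List.range n).foldl
    (fun cur j =>
      if (mask >>> (n - 1 - j)) &&& 1 ≠ 0 then
        match PySem.Str.pyGet? s (index + (j : Int)) with
        | some c => cur.push c
        | none => cur
      else cur)
    current

-- Source B's outer loop over range(1 << n), with n a parameter
def posetFold (s : String) (index : Int) (n : Nat) (current : String) (result : List String) : List String :=
  (List.range (2 ^ n)).foldl
    (fun res mask =>
      let cur := posetMask s index n current mask
      if cur = "" then res else res ++ [cur])
    result

def poset_alt (s : String) (index : Int) (current : String) (result : List String) : List String :=
  posetFold s index (PySem.Str.len s - index).toNat current result

-- ===== PRECONDITION & SPEC =====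
-- Pre_ excludes exactly the inputs where A raises: index > len(s) (unbounded recursion, RecursionError)
-- and index < -len(s) (s[index] IndexError). A returns on every input satisfying Pre_.
def Pre_poset (s : String) (index : Int) (current : String) (result : List String) : Prop :=
  -(PySem.Str.len s) ≤ index ∧ index ≤ PySem.Str.len s
instance (s : String) (index : Int) (current : String) (result : List String) : Decidable (Pre_poset s index current result) := by unfold Pre_poset; infer_instance

def pvWitness_poset : String × Int × String × List String := ("ab", 0, "", [])

def Spec_poset (s : String) (index : Int) (current : String) (result : List String) (out : List String) : Prop := out = poset_alt s index current result
instance (s : String) (index : Int) (current : String) (result : List String) (out : List String) : Decidable (Spec_poset s index current result out) := by unfold Spec_poset; infer_instance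

-- ===== CLAIM (what is proved, stated in full; the proofs are below) =====
def Claim_equal_poset : Prop := ∀ (s : String) (index : Int) (current : String) (result : List String), Dom_poset s index current result → Pre_poset s index current result → Spec_poset s index current result (poset s index current result)

-- ===== LEMMAS AND PROOFS =====

-- Inside Pre_, s[index] exists whenever index < len(s)
theorem poset_get_some (s : String) (i : Int) (h1 : -(PySem.Str.len s) ≤ i)
    (h2 : i < PySem.Str.len s) : ∃ c, PySem.Str.pyGet? s i = some c := by
  rcases h : PySem.Str.pyGet? s i with _ | c
  · exfalso
    rw [show PySem.Str.pyGet? s i = PySem.List.pyGet? s.toList i from rfl,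
        PySem.List.pyGet?_eq_none_iff] at h
    exact h ⟨by simpa [PySem.Str.len] using h1, by simpa [PySem.Str.len] using h2⟩
  · exact ⟨c, rfl⟩

-- Low half of the masks (MSB clear): bit j of the (n+1)-bit mask is bit j-1 of the n-bit tail
theorem posetMask_low (s : String) (index : Int) (n : Nat) (current : String) (m : Nat)
    (hm : m < 2 ^ n) :
    posetMask s index (n + 1) current m = posetMask s (index + 1) n current m := by
  unfold posetMask
  rw [List.range_succ_eq_map, List.foldl_cons, List.foldl_map]
  have h0 : (m >>> n) % 2 = 0 := by
    rw [Nat.shiftRight_eq_div_pow, Nat.div_eq_of_lt hm]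
  rw [if_neg (by simp [h0])]
  apply PySem.List.foldl_congr_mem
  intro acc j _
  have hsh : n + 1 - 1 - Nat.succ j = n - 1 - j := by omega
  have hidx : index + (Nat.succ j : Int) = index + 1 + (j : Int) := by push_cast; ring
  rw [hsh, hidx]

-- High half (MSB set): append s[index] first, then the tail bits as an n-bit mask
theorem posetMask_high (s : String) (index : Int) (n : Nat) (current : String) (m : Nat)
    (hm : m < 2 ^ n) (c : Char) (hc : PySem.Str.pyGet? s index = some c) :
    posetMask s index (n + 1) current (2 ^ n + m) =
      posetMask s (index + 1) n (current.push c) m := by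
  unfold posetMask
  rw [List.range_succ_eq_map, List.foldl_cons, List.foldl_map]
  have h0 : ((2 ^ n + m) >>> n) % 2 = 1 := by
    rw [Nat.shiftRight_eq_div_pow, Nat.add_div_left _ (Nat.two_pow_pos n),
        Nat.div_eq_of_lt hm]
  rw [if_pos (by simp [h0])]
  simp only [show index + ((0 : Nat) : Int) = index by simp, hc]
  apply PySem.List.foldl_congr_mem
  intro acc j hj
  have hjn : j < n := List.mem_range.mp hj
  have hbit : ((2 ^ n + m) >>> (n + 1 - 1 - Nat.succ j)) &&& 1
      = (m >>> (n - 1 - j)) &&& 1 := by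
    have hk : n + 1 - 1 - Nat.succ j = n - 1 - j := by omega
    simp only [Nat.and_one_is_mod, hk, Nat.shiftRight_eq_div_pow]
    have hdvd : (2 : Nat) ^ (n - 1 - j) ∣ 2 ^ n := pow_dvd_pow 2 (by omega)
    rw [Nat.add_div_of_dvd_right hdvd,
        Nat.pow_div (by omega) (by norm_num)]
    have hpos : 1 ≤ n - (n - 1 - j) := by omega
    obtain ⟨t, ht⟩ : ∃ t, n - (n - 1 - j) = t + 1 := ⟨n - (n - 1 - j) - 1, by omega⟩
    rw [ht, pow_succ]
    omega
  have hidx : index + (Nat.succ j : Int) = index + 1 + (j : Int) := by push_cast; ring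
  rw [hbit, hidx]

-- Main invariant: A's recursion equals B's fold, for n = len(s) - index remaining characters
theorem poset_eq_fold (s : String) (n : Nat) :
    ∀ (index : Int) (current : String) (result : List String),
    -(PySem.Str.len s) ≤ index → index ≤ PySem.Str.len s →
    (PySem.Str.len s - index).toNat = n →
    poset s index current result = posetFold s index n current result := by
  induction n with
  | zero =>
    intro index current result _ h2 hn
    have hidx : index = PySem.Str.len s := by omega
    rw [poset, if_pos hidx]
    unfold posetFold
    simp [posetMask]
  | succ n ih =>
    intro index current result h1 h2 hn
    have hne : index ≠ PySem.Str.len s := by omega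
    have hlt : index < PySem.Str.len s := by omega
    obtain ⟨c, hc⟩ := poset_get_some s index h1 hlt
    rw [poset, if_neg hne, dif_pos hlt]
    simp only [hc]
    have ih1 := ih (index + 1) current result (by omega) (by omega) (by omega)
    have ih2 := ih (index + 1) (current.push c) (poset s (index + 1) current result)
      (by omega) (by omega) (by omega)
    rw [ih2, ih1]
    -- now purely about the folds
    symm
    unfold posetFold
    rw [pow_succ, mul_two, List.range_add, List.foldl_append, List.foldl_map]
    rw [PySem.List.foldl_congr_mem (List.range (2 ^ n)) _
      (fun res mask =>
        let cur := posetMask s (index + 1) n current mask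
        if cur = "" then res else res ++ [cur]) result
      (by intro acc m hm; simp only [posetMask_low s index n current m (List.mem_range.mp hm)])]
    apply PySem.List.foldl_congr_mem
    intro acc m hm
    simp only [posetMask_high s index n current m (List.mem_range.mp hm) c hc]

-- ===== VERDICT (by name: the statement is the Claim_ definition above) =====
theorem poset_spec : Claim_equal_poset := by
  intro s index current result _ hpre
  unfold Spec_poset poset_alt
  exact poset_eq_fold s (PySem.Str.len s - index).toNat index current result hpre.1 hpre.2 rfl
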